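-- pv_equiv track=rewrite | github.com/libinruan/kaggle | TPS-2021/march/hierarchical_baycat_target_encoder.py | _generate_subsets
-- ===== SOURCE A (Python) =====
-- from collections import defaultdict
--
-- def _generate_subsets(groups, delimiter='.'):
--     # cnt = 0
--     # groups = groups
--     # delimiter = delimiter
--     subsets = defaultdict(list)
--     for g in groups:
--         chain = g.split(delimiter)
--         for i in range(len(chain)):
--             if chain[i] and not chain[:i+1] in subsets[i]: subsets[i].append(chain[:i+1])
--     ret = []
--     for _, v in subsets.items():
--         if not v in ret: ret.extend(v)
--     return ret
-- ===== SOURCE B (Python) =====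
-- def _generate_subsets(groups, delimiter='.'):
--     # Depth-major strategy: pre-split once, find the depths in first-appearance
--     # order, then emit one dedicated pass over the chains per depth.
--     chains = [g.split(delimiter) for g in groups]
--     depths = []
--     for ch in chains:
--         for i, part in enumerate(ch):
--             if part and i not in depths:
--                 depths.append(i)
--     ret = []
--     for d in depths:
--         seen = set()
--         for ch in chains:
--             if len(ch) > d and ch[d]:
--                 key = tuple(ch[:d + 1])
--                 if key not in seen:
--                     seen.add(key)
--                     ret.append(ch[:d + 1])
--     return ret
-- ===== Notes on version B (the rewrite author's own statement) =====
-- stated objective: faster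
-- what changed: A makes one group-major pass that builds per-depth defaultdict buckets during the scan, deduplicating each bucket by a linear list-membership scan over unhashable list values, then concatenates the buckets; B is depth-major: it pre-splits all groups once, collects the depths in first-appearance order, then runs one dedicated pass over the pre-split chains per depth with a per-depth hash set (of tuples) for O(1) dedup, appending straight to the output.
-- outside the precondition, e.g. on _generate_subsets([], ''): A returns [], B returns []; on _generate_subsets(['a.b'], ''): A raises ValueError, B raises ValueError
import Mathlib
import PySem

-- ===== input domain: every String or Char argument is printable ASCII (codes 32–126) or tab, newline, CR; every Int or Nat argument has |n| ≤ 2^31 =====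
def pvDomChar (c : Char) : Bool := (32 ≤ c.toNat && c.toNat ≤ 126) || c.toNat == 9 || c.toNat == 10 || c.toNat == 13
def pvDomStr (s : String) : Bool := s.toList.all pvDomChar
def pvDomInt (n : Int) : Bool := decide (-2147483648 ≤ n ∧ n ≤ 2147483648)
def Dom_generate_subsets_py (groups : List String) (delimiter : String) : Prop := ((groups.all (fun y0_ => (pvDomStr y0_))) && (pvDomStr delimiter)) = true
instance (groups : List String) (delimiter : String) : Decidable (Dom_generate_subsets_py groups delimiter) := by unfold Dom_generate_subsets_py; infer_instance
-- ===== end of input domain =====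

-- B replaces A's single group-major pass that builds per-depth defaultdict buckets (deduplicated
-- by a linear list-membership scan) with staged depth-major passes: split once, collect the depths
-- in first-appearance order, then emit one dedicated pass over the pre-split chains per depth,
-- deduplicating with a per-depth hash set.

-- ===== PORT A =====
-- inner loop body: 'if chain[i] and not chain[:i+1] in subsets[i]: subsets[i].append(chain[:i+1])'
-- (the defaultdict access 'subsets[i]' creates key i with [] whenever chain[i] is truthy; insert of
-- a fresh key appends it, insert of a present key keeps its position — exactly dict semantics)
def aStep (chain : List String) (d : PySem.Dict Int (List (List String))) (i : Int) :
    PySem.Dict Int (List (List String)) :=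
  if PySem.List.pyGetD chain i "" ≠ "" then
    let bucket := d.getD i []
    let pref := PySem.List.slice chain none (some (i + 1))   -- chain[:i+1]
    d.insert i (if pref ∈ bucket then bucket else bucket ++ [pref])
  else d

-- outer loop body: chain = g.split(delimiter); for i in range(len(chain)): …
-- (split? is none only for delimiter = "", where Python raises ValueError — excluded by Pre_)
def aGroup (delimiter : String) (d : PySem.Dict Int (List (List String))) (g : String) :
    PySem.Dict Int (List (List String)) :=
  let chain := (PySem.Str.split? g delimiter).getD []
  (PySem.List.pyRange 0 (PySem.List.len chain)).foldl (aStep chain) d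

def generate_subsets_py (groups : List String) (delimiter : String) : List (List String) :=
  let subsets := groups.foldl (aGroup delimiter) PySem.Dict.empty
  -- 'for _, v in subsets.items(): if not v in ret: ret.extend(v)': 'v in ret' compares a list of
  -- chains with single chains, so in Python it is always False for the nonempty buckets this dict
  -- holds (and it is not even typable here); ported as the unconditional extend it amounts to.
  subsets.items.foldl (fun ret kv => ret ++ kv.2) []

-- ===== PORT B =====
-- depths pass: for ch in chains: for i, part in enumerate(ch): if part and i not in depths: …
def bDepthChain (depths : List Int) (ch : List String) : List Int :=
  (PySem.List.enumerate ch).foldl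
    (fun depths ip => if ip.2 ≠ "" ∧ ip.1 ∉ depths then depths ++ [ip.1] else depths) depths

-- per-depth pass body: if len(ch) > d and ch[d]: key = tuple(ch[:d+1]); if key not in seen: …
def bBlockStep (dep : Int) (st : PySem.Set (List String) × List (List String))
    (ch : List String) : PySem.Set (List String) × List (List String) :=
  if dep < PySem.List.len ch ∧ PySem.List.pyGetD ch dep "" ≠ "" then
    let key := PySem.List.slice ch none (some (dep + 1))   -- ch[:d+1]
    if key ∈ st.1 then st else (PySem.Set.add st.1 key, st.2 ++ [key])
  else st

def generate_subsets_py_alt (groups : List String) (delimiter : String) : List (List String) :=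
  -- chains = [g.split(delimiter) for g in groups]  (same split? note as in port A)
  let chains := groups.map (fun g => (PySem.Str.split? g delimiter).getD [])
  let depths := chains.foldl bDepthChain []
  -- for d in depths: seen = set(); for ch in chains: …  (ret threads through, seen is per depth)
  depths.foldl (fun ret dep => (chains.foldl (bBlockStep dep) (PySem.Set.empty, ret)).2) []

-- ===== PRECONDITION & SPEC =====
-- Pre_ excludes only delimiter = "", on which Python's str.split raises ValueError in A and in B
-- (vacuously, for groups = [], neither program splits and both still return []).
def Pre_generate_subsets_py (groups : List String) (delimiter : String) : Prop := delimiter ≠ ""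
instance (groups : List String) (delimiter : String) : Decidable (Pre_generate_subsets_py groups delimiter) := by unfold Pre_generate_subsets_py; infer_instance
def pvWitness_generate_subsets_py : List String × String := (["a.b.c", "a.b", "x..y", "a.b.c"], ".")

def Spec_generate_subsets_py (groups : List String) (delimiter : String) (out : List (List String)) : Prop := out = generate_subsets_py_alt groups delimiter
instance (groups : List String) (delimiter : String) (out : List (List String)) : Decidable (Spec_generate_subsets_py groups delimiter out) := by unfold Spec_generate_subsets_py; infer_instance

-- ===== CLAIM (what is proved, stated in full; the proofs are below) =====
def Claim_equal_generate_subsets_py : Prop := ∀ (groups : List String) (delimiter : String), Dom_generate_subsets_py groups delimiter → Pre_generate_subsets_py groups delimiter → Spec_generate_subsets_py groups delimiter (generate_subsets_py groups delimiter)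

-- ===== LEMMAS AND PROOFS =====

-- Proof-only GHOST machine: a single group-major pass carrying (seen prefixes, flat list of
-- distinct prefixes in first-appearance order, depths in first-appearance order).  A's dict is
-- characterised against it by pvInv; B's two staged passes are then read off the same state.
def gStep (parts : List String) (st : PySem.Set (List String) × List (List String) × List Int)
    (ip : Int × String) : PySem.Set (List String) × List (List String) × List Int :=
  match st with
  | (seen, flat, depths) =>
    if ip.2 ≠ "" then
      let depths := if ip.1 ∈ depths then depths else depths ++ [ip.1]
      let key := PySem.List.slice parts none (some (ip.1 + 1))
      if key ∈ seen then (seen, flat, depths)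
      else (PySem.Set.add seen key, flat ++ [key], depths)
    else (seen, flat, depths)

def gGroup (delimiter : String) (st : PySem.Set (List String) × List (List String) × List Int)
    (g : String) : PySem.Set (List String) × List (List String) × List Int :=
  let parts := (PySem.Str.split? g delimiter).getD []
  (PySem.List.enumerate parts).foldl (gStep parts) st

-- The invariant tying A's dict of depth-buckets to the ghost (seen, flat, depths) state.
def pvInv (d : PySem.Dict Int (List (List String))) (seen : PySem.Set (List String))
    (flat : List (List String)) (depths : List Int) : Prop :=
  d.items = depths.map (fun k => (k, flat.filter (fun p => PySem.List.len p == k + 1)))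
  ∧ (∀ p, p ∈ seen ↔ p ∈ flat)
  ∧ (∀ p ∈ flat, 1 ≤ PySem.List.len p ∧ (PySem.List.len p - 1) ∈ depths)
  ∧ depths.Nodup
  ∧ (∀ k ∈ depths, 0 ≤ k)

lemma pvInv_step (chain : List String) (i : Int) (h0 : 0 ≤ i) (hi : i < PySem.List.len chain)
    (d : PySem.Dict Int (List (List String))) (seen : PySem.Set (List String))
    (flat : List (List String)) (depths : List Int) (h : pvInv d seen flat depths) :
    ∃ seen' flat' depths',
      gStep chain (seen, flat, depths) (i, PySem.List.pyGetD chain i "") = (seen', flat', depths')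
      ∧ pvInv (aStep chain d i) seen' flat' depths' := by
  obtain ⟨hitems, hseen, hflat, hnd, hpos⟩ := h
  by_cases hcond : PySem.List.pyGetD chain i "" = ""
  · exact ⟨seen, flat, depths, by simp [gStep, hcond], by
      simp [aStep, hcond]; exact ⟨hitems, hseen, hflat, hnd, hpos⟩⟩
  · set pref := PySem.List.slice chain none (some (i + 1)) with hpref
    have hchainlen : i < (chain.length : Int) := by
      simpa [PySem.List.len_eq] using hi
    have hlen : PySem.List.len pref = i + 1 := by
      rw [hpref, PySem.List.slice_to chain (show (0:Int) ≤ i + 1 by omega)]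
      simp [PySem.List.len_eq]
      omega
    have hkeys : d.keys = depths := by
      simp only [PySem.Dict.keys, hitems, List.map_map]
      exact (List.map_congr_left fun k _ => rfl).trans (List.map_id _)
    have hndk : d.keys.Nodup := hkeys ▸ hnd
    have hlen' : (pref.length : Int) = i + 1 := by
      simpa [PySem.List.len_eq] using hlen
    have hbeq : ∀ k : Int, ((pref.length : Int) == k + 1) = decide (k = i) := by
      intro k; rw [hlen']; by_cases hk : k = i <;> simp [hk] <;> omega
    by_cases hdep : i ∈ depths
    · have hcont : d.contains i = true := by
        rw [PySem.Dict.contains_iff_mem_keys, hkeys]; exact hdep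
      have hgetD : d.getD i [] = flat.filter (fun p => PySem.List.len p == i + 1) := by
        refine PySem.Dict.getD_of_mem_items d ?_ hndk []
        rw [hitems]; exact List.mem_map.2 ⟨i, hdep, rfl⟩
      have hmemb : pref ∈ d.getD i [] ↔ pref ∈ flat := by
        rw [hgetD]; simp [List.mem_filter, hlen']
      by_cases hfl : pref ∈ flat
      · -- already collected: both sides unchanged
        refine ⟨seen, flat, depths, ?_, ?_⟩
        · simp only [gStep, ite_not]
          simp [hdep, ← hpref, (hseen pref).2 hfl]
        · refine ⟨?_, hseen, hflat, hnd, hpos⟩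
          have hbm : pref ∈ d.getD i [] := hmemb.2 hfl
          have hA : aStep chain d i = d.insert i (d.getD i []) := by
            simp [aStep, hcond, ← hpref, hbm]
          rw [hA, PySem.Dict.items_insert_of_contains d _ hcont, hitems, List.map_map]
          refine List.map_congr_left (fun k hk => ?_)
          by_cases hki : k = i
          · subst hki; simp [hgetD]
          · simp [Function.comp, hki]
      · -- new prefix at a known depth
        have hsn : pref ∉ seen := fun hc => hfl ((hseen pref).1 hc)
        refine ⟨PySem.Set.add seen pref, flat ++ [pref], depths, ?_, ?_⟩
        · simp only [gStep, hcond, ite_not]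
          simp [hdep, ← hpref, hsn]
        · refine ⟨?_, ?_, ?_, hnd, hpos⟩
          · have hbm : pref ∉ d.getD i [] := fun hc => hfl (hmemb.1 hc)
            have hA : aStep chain d i = d.insert i (d.getD i [] ++ [pref]) := by
              simp [aStep, hcond, ← hpref, hbm]
            rw [hA, PySem.Dict.items_insert_of_contains d _ hcont, hitems, List.map_map]
            refine List.map_congr_left (fun k hk => ?_)
            by_cases hki : k = i
            · subst hki; simp [Function.comp, hgetD, List.filter_append, hlen']
            · simp [Function.comp, List.filter_append, hbeq, hki]
          · intro p
            rw [PySem.Set.mem_add]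
            constructor
            · rintro (hp | rfl)
              · exact List.mem_append_left _ ((hseen p).1 hp)
              · exact List.mem_append_right _ (by simp)
            · intro hp
              rcases List.mem_append.1 hp with hp | hp
              · exact Or.inl ((hseen p).2 hp)
              · simp at hp; exact Or.inr hp
          · intro p hp
            rcases List.mem_append.1 hp with hp | hp
            · exact hflat p hp
            · simp at hp; subst hp
              exact ⟨by omega, by rw [hlen]; simpa using hdep⟩
    · -- fresh depth
      have hcont : d.contains i = false := by
        rw [Bool.eq_false_iff]
        intro hc
        exact hdep (hkeys ▸ (PySem.Dict.contains_iff_mem_keys d i).1 hc)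
      have hfl : pref ∉ flat := by
        intro hc
        obtain ⟨h1, h2⟩ := hflat pref hc
        rw [hlen] at h2
        exact hdep (by simpa using h2)
      have hsn : pref ∉ seen := fun hc => hfl ((hseen pref).1 hc)
      have hgetD : d.getD i [] = [] :=
        PySem.Dict.getD_of_not_contains d [] hcont
      refine ⟨PySem.Set.add seen pref, flat ++ [pref], depths ++ [i], ?_, ?_⟩
      · simp only [gStep, hcond, ite_not]
        simp [hdep, ← hpref, hsn]
      · refine ⟨?_, ?_, ?_, ?_, ?_⟩
        · have hA : aStep chain d i = d.insert i [pref] := by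
            simp [aStep, hcond, ← hpref, hgetD]
          rw [hA, PySem.Dict.items_insert_of_not_contains d _ hcont, hitems, List.map_append]
          congr 1
          · refine List.map_congr_left (fun k hk => ?_)
            have hki : k ≠ i := fun hc => hdep (hc ▸ hk)
            simp [List.filter_append, hbeq, hki]
          · simp [List.filter_append, hlen']
            intro a ha hc
            obtain ⟨h1, h2⟩ := hflat a ha
            rw [PySem.List.len_eq] at h2
            exact hdep (by rw [show i = (a.length : Int) - 1 by omega]; exact h2)
        · intro p
          rw [PySem.Set.mem_add]
          constructor
          · rintro (hp | rfl)
            · exact List.mem_append_left _ ((hseen p).1 hp)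
            · exact List.mem_append_right _ (by simp)
          · intro hp
            rcases List.mem_append.1 hp with hp | hp
            · exact Or.inl ((hseen p).2 hp)
            · simp at hp; exact Or.inr hp
        · intro p hp
          rcases List.mem_append.1 hp with hp | hp
          · obtain ⟨h1, h2⟩ := hflat p hp
            exact ⟨h1, List.mem_append_left _ h2⟩
          · simp at hp; subst hp
            exact ⟨by omega, by rw [hlen]; simp⟩
        · rw [List.nodup_append]
          refine ⟨hnd, List.nodup_singleton _, ?_⟩
          intro a ha b hb
          rw [List.mem_singleton] at hb
          exact fun hc => hdep ((hb ▸ hc) ▸ ha)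
        · intro k hk
          rcases List.mem_append.1 hk with hk | hk
          · exact hpos k hk
          · simp at hk; omega

lemma pvInv_fold (chain : List String) (is : List Int)
    (hmem : ∀ i ∈ is, 0 ≤ i ∧ i < PySem.List.len chain)
    (d : PySem.Dict Int (List (List String))) (seen : PySem.Set (List String))
    (flat : List (List String)) (depths : List Int) (h : pvInv d seen flat depths) :
    ∃ seen' flat' depths',
      (is.map (fun i => (i, PySem.List.pyGetD chain i ""))).foldl (gStep chain) (seen, flat, depths)
        = (seen', flat', depths')
      ∧ pvInv (is.foldl (aStep chain) d) seen' flat' depths' := by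
  induction is generalizing d seen flat depths with
  | nil => exact ⟨seen, flat, depths, rfl, h⟩
  | cons i is ih =>
    obtain ⟨hi0, hilt⟩ := hmem i List.mem_cons_self
    obtain ⟨s1, f1, d1, hb, hinv⟩ := pvInv_step chain i hi0 hilt d seen flat depths h
    simp only [List.map_cons, List.foldl_cons, hb]
    exact ih (fun j hj => hmem j (List.mem_cons_of_mem _ hj)) _ s1 f1 d1 hinv

lemma pvInv_group (delimiter g : String)
    (d : PySem.Dict Int (List (List String))) (seen : PySem.Set (List String))
    (flat : List (List String)) (depths : List Int) (h : pvInv d seen flat depths) :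
    ∃ seen' flat' depths',
      gGroup delimiter (seen, flat, depths) g = (seen', flat', depths')
      ∧ pvInv (aGroup delimiter d g) seen' flat' depths' := by
  simp only [aGroup, gGroup, PySem.List.enumerate_eq_map_pyRange _ ""]
  exact pvInv_fold _ _
    (fun i hi => ⟨(PySem.List.mem_pyRange_one.1 hi).1, (PySem.List.mem_pyRange_one.1 hi).2⟩)
    d seen flat depths h

lemma pvInv_groups (delimiter : String) (groups : List String)
    (d : PySem.Dict Int (List (List String))) (seen : PySem.Set (List String))
    (flat : List (List String)) (depths : List Int) (h : pvInv d seen flat depths) :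
    ∃ seen' flat' depths',
      groups.foldl (gGroup delimiter) (seen, flat, depths) = (seen', flat', depths')
      ∧ pvInv (groups.foldl (aGroup delimiter) d) seen' flat' depths' := by
  induction groups generalizing d seen flat depths with
  | nil => exact ⟨seen, flat, depths, rfl, h⟩
  | cons g gs ih =>
    obtain ⟨s1, f1, d1, hb, hinv⟩ := pvInv_group delimiter g d seen flat depths h
    simp only [List.foldl_cons, hb]
    exact ih _ s1 f1 d1 hinv

-- ---- bridging B's depths pass to the ghost state (third projection) ----

lemma pvThd_step (parts : List String) (st : PySem.Set (List String) × List (List String) × List Int)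
    (ip : Int × String) :
    (gStep parts st ip).2.2
      = if ip.2 ≠ "" ∧ ip.1 ∉ st.2.2 then st.2.2 ++ [ip.1] else st.2.2 := by
  obtain ⟨s, f, d⟩ := st
  by_cases h1 : ip.2 = ""
  · simp [gStep, h1]
  · by_cases h2 : ip.1 ∈ d
    · simp only [gStep]
      simp [h1, h2]
      split <;> rfl
    · simp only [gStep]
      simp [h1, h2]
      split <;> rfl

lemma pvThd_fold (parts : List String) (L : List (Int × String))
    (st : PySem.Set (List String) × List (List String) × List Int) :
    (L.foldl (gStep parts) st).2.2
      = L.foldl (fun depths ip => if ip.2 ≠ "" ∧ ip.1 ∉ depths then depths ++ [ip.1] else depths)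
          st.2.2 := by
  induction L generalizing st with
  | nil => rfl
  | cons p L ih =>
    simp only [List.foldl_cons]
    rw [ih, pvThd_step]

lemma pvThd_groups (delimiter : String) (gs : List String)
    (st : PySem.Set (List String) × List (List String) × List Int) :
    (gs.foldl (gGroup delimiter) st).2.2
      = (gs.map (fun g => (PySem.Str.split? g delimiter).getD [])).foldl bDepthChain st.2.2 := by
  induction gs generalizing st with
  | nil => rfl
  | cons g gs ih =>
    simp only [List.foldl_cons, List.map_cons]
    rw [ih]
    congr 1
    exact pvThd_fold _ _ _

-- ---- bridging B's per-depth block pass to the ghost flat list ----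

-- effect of one whole chain of the ghost pass on 'flat' filtered at one depth
lemma pvChain_fold (chain : List String) (dep : Int) (is : List Int)
    (hnd : is.Nodup) (hmem : ∀ i ∈ is, 0 ≤ i ∧ i < PySem.List.len chain)
    (seen : PySem.Set (List String)) (flat : List (List String)) (depths : List Int)
    (hseen : ∀ p, p ∈ seen ↔ p ∈ flat) :
    ∃ seen2 flat2 depths2,
      (is.map (fun i => (i, PySem.List.pyGetD chain i ""))).foldl (gStep chain) (seen, flat, depths)
        = (seen2, flat2, depths2)
      ∧ (∀ p, p ∈ seen2 ↔ p ∈ flat2)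
      ∧ flat2.filter (fun p => PySem.List.len p == dep + 1)
          = flat.filter (fun p => PySem.List.len p == dep + 1)
            ++ (if dep ∈ is ∧ PySem.List.pyGetD chain dep "" ≠ ""
                  ∧ PySem.List.slice chain none (some (dep + 1)) ∉ flat
                then [PySem.List.slice chain none (some (dep + 1))] else []) := by
  induction is generalizing seen flat depths with
  | nil => exact ⟨seen, flat, depths, rfl, hseen, by simp⟩
  | cons i is ih =>
    obtain ⟨hi0, hilt⟩ := hmem i List.mem_cons_self
    have hndt : is.Nodup := hnd.of_cons
    have hni : i ∉ is := (List.nodup_cons.1 hnd).1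
    have hmemt : ∀ j ∈ is, 0 ≤ j ∧ j < PySem.List.len chain :=
      fun j hj => hmem j (List.mem_cons_of_mem _ hj)
    have hchainlen : i < (chain.length : Int) := by simpa [PySem.List.len_eq] using hilt
    have hleni : PySem.List.len (PySem.List.slice chain none (some (i + 1))) = i + 1 := by
      rw [PySem.List.slice_to chain (show (0:Int) ≤ i + 1 by omega)]
      simp [PySem.List.len_eq]
      omega
    by_cases hve : PySem.List.pyGetD chain i "" = ""
    · -- empty component: ghost state unchanged
      have hstep : gStep chain (seen, flat, depths) (i, PySem.List.pyGetD chain i "")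
          = (seen, flat, depths) := by
        simp [gStep, hve]
      simp only [List.map_cons, List.foldl_cons, hstep]
      obtain ⟨s2, f2, d2, hfold, hs2, hfil⟩ := ih hndt hmemt seen flat depths hseen
      refine ⟨s2, f2, d2, hfold, hs2, ?_⟩
      rw [hfil]
      congr 1
      by_cases hid : i = dep
      · subst hid
        simp [hve]
      · have hdi : dep ≠ i := fun h => hid h.symm
        simp only [List.mem_cons, hdi, false_or]
    · -- nonempty component at index i
      by_cases hsi : PySem.List.slice chain none (some (i + 1)) ∈ seen
      · -- already seen: flat unchanged, only depths may change
        have hfli : PySem.List.slice chain none (some (i + 1)) ∈ flat :=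
          (hseen _).1 hsi
        have hstep : gStep chain (seen, flat, depths) (i, PySem.List.pyGetD chain i "")
            = (seen, flat, if i ∈ depths then depths else depths ++ [i]) := by
          simp only [gStep, ite_not]
          simp [hve, hsi]
        simp only [List.map_cons, List.foldl_cons, hstep]
        obtain ⟨s2, f2, d2, hfold, hs2, hfil⟩ :=
          ih hndt hmemt seen flat _ hseen
        refine ⟨s2, f2, d2, hfold, hs2, ?_⟩
        rw [hfil]
        congr 1
        by_cases hid : i = dep
        · subst hid
          have h2 : ¬ (i ∈ is ∧ PySem.List.pyGetD chain i "" ≠ ""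
              ∧ PySem.List.slice chain none (some (i + 1)) ∉ flat) := by
            rintro ⟨hc, -, -⟩; exact hni hc
          have h1 : ¬ (i ∈ i :: is ∧ PySem.List.pyGetD chain i "" ≠ ""
              ∧ PySem.List.slice chain none (some (i + 1)) ∉ flat) := by
            rintro ⟨-, -, hc⟩; exact hc hfli
          rw [if_neg h2, if_neg h1]
        · have hdi : dep ≠ i := fun h => hid h.symm
          simp only [List.mem_cons, hdi, false_or]
      · -- fresh prefix: flat grows by chain[:i+1]
        have hfli : PySem.List.slice chain none (some (i + 1)) ∉ flat :=
          fun hc => hsi ((hseen _).2 hc)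
        have hstep : gStep chain (seen, flat, depths) (i, PySem.List.pyGetD chain i "")
            = (PySem.Set.add seen (PySem.List.slice chain none (some (i + 1))),
               flat ++ [PySem.List.slice chain none (some (i + 1))],
               if i ∈ depths then depths else depths ++ [i]) := by
          simp only [gStep, ite_not]
          simp [hve, hsi]
        have hseen' : ∀ p, p ∈ PySem.Set.add seen (PySem.List.slice chain none (some (i + 1)))
            ↔ p ∈ flat ++ [PySem.List.slice chain none (some (i + 1))] := by
          intro p
          rw [PySem.Set.mem_add, List.mem_append]
          simp [hseen p]
        simp only [List.map_cons, List.foldl_cons, hstep]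
        obtain ⟨s2, f2, d2, hfold, hs2, hfil⟩ :=
          ih hndt hmemt _ (flat ++ [PySem.List.slice chain none (some (i + 1))]) _ hseen'
        refine ⟨s2, f2, d2, hfold, hs2, ?_⟩
        rw [hfil]
        by_cases hid : i = dep
        · subst hid
          have hP : (PySem.List.len (PySem.List.slice chain none (some (i + 1))) == i + 1)
              = true := by
            rw [hleni]
            simp
          have h2 : ¬ (i ∈ is ∧ PySem.List.pyGetD chain i "" ≠ ""
              ∧ PySem.List.slice chain none (some (i + 1))
                  ∉ flat ++ [PySem.List.slice chain none (some (i + 1))]) := by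
            rintro ⟨hc, -, -⟩; exact hni hc
          have h1 : (i ∈ i :: is ∧ PySem.List.pyGetD chain i "" ≠ ""
              ∧ PySem.List.slice chain none (some (i + 1)) ∉ flat) :=
            ⟨List.mem_cons_self, hve, hfli⟩
          rw [if_neg h2, if_pos h1, List.filter_append]
          simp only [List.filter_cons, List.filter_nil, hP, if_true, List.append_nil]
        · have hPne : (PySem.List.len (PySem.List.slice chain none (some (i + 1))) == dep + 1)
              = false := by
            rw [hleni]
            simp only [beq_eq_false_iff_ne, ne_eq]
            omega
          have hfapp : (flat ++ [PySem.List.slice chain none (some (i + 1))]).filter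
                (fun p => PySem.List.len p == dep + 1)
              = flat.filter (fun p => PySem.List.len p == dep + 1) := by
            rw [List.filter_append]
            simp only [List.filter_cons, List.filter_nil, hPne]
            simp
          rw [hfapp]
          congr 1
          by_cases hdin : dep ∈ is
          · obtain ⟨hd0, hdlt⟩ := hmemt dep hdin
            have hlend : PySem.List.len (PySem.List.slice chain none (some (dep + 1)))
                = dep + 1 := by
              rw [PySem.List.slice_to chain (show (0:Int) ≤ dep + 1 by omega)]
              simp [PySem.List.len_eq] at hdlt ⊢
              omega
            have hne : PySem.List.slice chain none (some (dep + 1))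
                ≠ PySem.List.slice chain none (some (i + 1)) := by
              intro hc
              rw [hc, hleni] at hlend
              omega
            have hmm : PySem.List.slice chain none (some (dep + 1))
                  ∈ flat ++ [PySem.List.slice chain none (some (i + 1))]
                ↔ PySem.List.slice chain none (some (dep + 1)) ∈ flat := by
              simp [List.mem_append, hne]
            have hdi : dep ≠ i := fun h => hid h.symm
            simp only [List.mem_cons, hdi, false_or, hmm]
          · have h1 : ¬ (dep ∈ i :: is ∧ PySem.List.pyGetD chain dep "" ≠ ""
                ∧ PySem.List.slice chain none (some (dep + 1)) ∉ flat) := by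
              rintro ⟨hm, -, -⟩
              rcases List.mem_cons.1 hm with hm | hm
              · exact hid hm.symm
              · exact hdin hm
            have h2 : ¬ (dep ∈ is ∧ PySem.List.pyGetD chain dep "" ≠ ""
                ∧ PySem.List.slice chain none (some (dep + 1))
                    ∉ flat ++ [PySem.List.slice chain none (some (i + 1))]) := by
              rintro ⟨hm, -, -⟩
              exact hdin hm
            rw [if_neg h1, if_neg h2]

-- effect of the whole ghost run versus one per-depth block pass of B
lemma pvBlock_fold (delimiter : String) (dep : Int) (hdep : 0 ≤ dep) (gs : List String)
    (seen : PySem.Set (List String)) (flat : List (List String)) (depths : List Int)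
    (bseen : PySem.Set (List String)) (ret0 out : List (List String))
    (hseen : ∀ p, p ∈ seen ↔ p ∈ flat)
    (hbs : ∀ p, p ∈ bseen ↔ p ∈ flat.filter (fun p => PySem.List.len p == dep + 1))
    (hout : out = ret0 ++ flat.filter (fun p => PySem.List.len p == dep + 1)) :
    ∃ seen2 flat2 depths2 bseen2,
      gs.foldl (gGroup delimiter) (seen, flat, depths) = (seen2, flat2, depths2)
      ∧ (gs.map (fun g => (PySem.Str.split? g delimiter).getD [])).foldl (bBlockStep dep)
          (bseen, out)
        = (bseen2, ret0 ++ flat2.filter (fun p => PySem.List.len p == dep + 1)) := by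
  induction gs generalizing seen flat depths bseen out with
  | nil => exact ⟨seen, flat, depths, bseen, rfl, by simp [hout]⟩
  | cons g gs ih =>
    have hgg : gGroup delimiter (seen, flat, depths) g
        = List.foldl (gStep ((PySem.Str.split? g delimiter).getD [])) (seen, flat, depths)
            (List.map (fun i => (i, PySem.List.pyGetD ((PySem.Str.split? g delimiter).getD []) i ""))
              (PySem.List.pyRange 0 (PySem.List.len ((PySem.Str.split? g delimiter).getD [])))) := by
      simp only [gGroup, PySem.List.enumerate_eq_map_pyRange _ ""]
    obtain ⟨s1, f1, d1, hfold1, hs1, hfil1⟩ :=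
      pvChain_fold ((PySem.Str.split? g delimiter).getD []) dep
        (PySem.List.pyRange 0 (PySem.List.len ((PySem.Str.split? g delimiter).getD [])))
        (PySem.List.nodup_pyRange_one _ _)
        (fun i hi => ⟨(PySem.List.mem_pyRange_one.1 hi).1, (PySem.List.mem_pyRange_one.1 hi).2⟩)
        seen flat depths hseen
    have hmemrange : dep ∈ PySem.List.pyRange 0
          (PySem.List.len ((PySem.Str.split? g delimiter).getD []))
        ↔ dep < PySem.List.len ((PySem.Str.split? g delimiter).getD []) := by
      rw [PySem.List.mem_pyRange_one]
      exact ⟨fun h => h.2, fun h => ⟨hdep, h⟩⟩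
    by_cases hc : dep < PySem.List.len ((PySem.Str.split? g delimiter).getD [])
        ∧ PySem.List.pyGetD ((PySem.Str.split? g delimiter).getD []) dep "" ≠ ""
    · have hlenp : PySem.List.len (PySem.List.slice ((PySem.Str.split? g delimiter).getD [])
            none (some (dep + 1))) = dep + 1 := by
        rw [PySem.List.slice_to _ (show (0:Int) ≤ dep + 1 by omega)]
        have := hc.1
        simp [PySem.List.len_eq] at this ⊢
        omega
      have hmemf : PySem.List.slice ((PySem.Str.split? g delimiter).getD []) none (some (dep + 1))
            ∈ flat.filter (fun p => PySem.List.len p == dep + 1)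
          ↔ PySem.List.slice ((PySem.Str.split? g delimiter).getD []) none (some (dep + 1))
            ∈ flat := by
        simp only [List.mem_filter, hlenp, beq_self_eq_true, and_true]
      by_cases hin : PySem.List.slice ((PySem.Str.split? g delimiter).getD [])
          none (some (dep + 1)) ∈ flat
      · -- nothing new at this depth from this chain
        have hfil : f1.filter (fun p => PySem.List.len p == dep + 1)
            = flat.filter (fun p => PySem.List.len p == dep + 1) := by
          rw [hfil1, if_neg]
          · simp
          · rintro ⟨_, _, hnm⟩; exact hnm hin
        have hbstep : bBlockStep dep (bseen, out) ((PySem.Str.split? g delimiter).getD [])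
            = (bseen, out) := by
          have hmem2 : PySem.List.slice ((PySem.Str.split? g delimiter).getD [])
              none (some (dep + 1)) ∈ bseen := (hbs _).2 (hmemf.2 hin)
          simp only [bBlockStep]
          rw [if_pos hc, if_pos hmem2]
        simp only [List.map_cons, List.foldl_cons]
        rw [hgg, hfold1, hbstep]
        exact ih s1 f1 d1 bseen out hs1 (by rw [hfil]; exact hbs)
          (by rw [hfil]; exact hout)
      · -- this chain contributes its prefix at this depth
        have hfil : f1.filter (fun p => PySem.List.len p == dep + 1)
            = flat.filter (fun p => PySem.List.len p == dep + 1)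
              ++ [PySem.List.slice ((PySem.Str.split? g delimiter).getD [])
                    none (some (dep + 1))] := by
          rw [hfil1, if_pos ⟨hmemrange.2 hc.1, hc.2, hin⟩]
        have hnb : PySem.List.slice ((PySem.Str.split? g delimiter).getD [])
            none (some (dep + 1)) ∉ bseen :=
          fun hcc => hin (hmemf.1 ((hbs _).1 hcc))
        have hbstep : bBlockStep dep (bseen, out) ((PySem.Str.split? g delimiter).getD [])
            = (PySem.Set.add bseen (PySem.List.slice ((PySem.Str.split? g delimiter).getD [])
                 none (some (dep + 1))),
               out ++ [PySem.List.slice ((PySem.Str.split? g delimiter).getD [])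
                 none (some (dep + 1))]) := by
          simp only [bBlockStep]
          rw [if_pos hc, if_neg hnb]
        simp only [List.map_cons, List.foldl_cons]
        rw [hgg, hfold1, hbstep]
        refine ih s1 f1 d1 _ _ hs1 ?_ ?_
        · intro p
          rw [PySem.Set.mem_add, hfil, List.mem_append]
          simp [hbs p]
        · rw [hfil, hout, List.append_assoc]
    · -- this chain has no valid component at this depth
      have hfil : f1.filter (fun p => PySem.List.len p == dep + 1)
          = flat.filter (fun p => PySem.List.len p == dep + 1) := by
        rw [hfil1, if_neg]
        · simp
        · rintro ⟨hm, hne, _⟩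
          exact hc ⟨hmemrange.1 hm, hne⟩
      have hbstep : bBlockStep dep (bseen, out) ((PySem.Str.split? g delimiter).getD [])
          = (bseen, out) := by
        simp only [bBlockStep]
        rw [if_neg hc]
      simp only [List.map_cons, List.foldl_cons]
      rw [hgg, hfold1, hbstep]
      exact ih s1 f1 d1 bseen out hs1 (by rw [hfil]; exact hbs)
        (by rw [hfil]; exact hout)

-- ===== VERDICT (by name: the statement is the Claim_ definition above) =====
theorem generate_subsets_py_spec : Claim_equal_generate_subsets_py := by
  intro groups delimiter _ _
  unfold Spec_generate_subsets_py generate_subsets_py generate_subsets_py_alt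
  show (groups.foldl (aGroup delimiter) PySem.Dict.empty).items.foldl
      (fun ret kv => ret ++ kv.2) []
    = ((groups.map (fun g => (PySem.Str.split? g delimiter).getD [])).foldl bDepthChain []).foldl
        (fun ret dep => ((groups.map (fun g => (PySem.Str.split? g delimiter).getD [])).foldl
          (bBlockStep dep) (PySem.Set.empty, ret)).2) []
  obtain ⟨seen', flat', depths', hB, hInv⟩ :=
    pvInv_groups delimiter groups PySem.Dict.empty PySem.Set.empty [] []
      (by refine ⟨rfl, ?_, ?_, ?_, ?_⟩ <;> simp [PySem.Set.empty])
  obtain ⟨hitems, hseen', hflat', hnd', hpos'⟩ := hInv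
  -- B's depths pass computes the ghost depths'
  have hD : (groups.map (fun g => (PySem.Str.split? g delimiter).getD [])).foldl bDepthChain []
      = depths' := by
    have h := pvThd_groups delimiter groups (PySem.Set.empty, [], [])
    rw [hB] at h
    exact h.symm
  -- B's per-depth passes emit the flat'-filters
  have hBlk : ∀ (ret : List (List String)) (dep : Int), dep ∈ depths' →
      ((groups.map (fun g => (PySem.Str.split? g delimiter).getD [])).foldl (bBlockStep dep)
        (PySem.Set.empty, ret)).2
      = ret ++ flat'.filter (fun p => PySem.List.len p == dep + 1) := by
    intro ret dep hdm
    obtain ⟨s2, f2, d2, b2, hg, hblk⟩ :=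
      pvBlock_fold delimiter dep (hpos' dep hdm) groups PySem.Set.empty [] [] PySem.Set.empty
        ret ret (by simp [PySem.Set.empty]) (by simp [PySem.Set.empty]) (by simp)
    rw [hB] at hg
    injection hg with h1 h23
    injection h23 with h2 h3
    rw [hblk, h2]
  have hcong : depths'.foldl
      (fun ret dep => ((groups.map (fun g => (PySem.Str.split? g delimiter).getD [])).foldl
        (bBlockStep dep) (PySem.Set.empty, ret)).2) []
      = depths'.foldl
      (fun ret dep => ret ++ flat'.filter (fun p => PySem.List.len p == dep + 1)) [] :=
    PySem.List.foldl_congr_mem depths' _ _ _ (fun acc x hx => hBlk acc x hx)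
  rw [hitems, List.foldl_map,
    PySem.List.foldl_append_eq_flatMap
      (fun k : Int => flat'.filter (fun p => PySem.List.len p == k + 1)), hD, hcong,
    PySem.List.foldl_append_eq_flatMap
      (fun k : Int => flat'.filter (fun p => PySem.List.len p == k + 1))]
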